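-- pv_equiv track=rewrite | github.com/joshanashakya/dissertation | workspace/dataset/java-python/GeeksForGeeks/257/A/2.py | findNumOfPair
-- ===== SOURCE A (Python) =====
-- from bisect import bisect_left as lower_bound
--
-- def findNumOfPair(a, n):
--
--     # Sorting the given array
--     a = sorted(a)
--
--     # Variable to store the count of pairs
--     ans = 0
--
--     # Loop to iterate through the array
--     for i in range(n):
--
--         # Ignore if the value is negative
--         if (a[i] <= 0):
--             continue
--
--         # Finding the index using lower_bound
--         j = lower_bound(a,-a[i] + 1)
--
--         # Finding the number of pairs between
--         # two indices i and j
--         ans += i - j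
--     return ans
-- ===== SOURCE B (Python) =====
-- from bisect import bisect_left
--
--
-- def findNumOfPair(a, n):
--     # Order-of-summation swap: A sums (i - #{x : x < 1-a[i]}) per positive element;
--     # B sums the positive indices once, then subtracts, for each element x of the
--     # array, how many recorded positive values v satisfy v < 1 - x (same count by
--     # symmetry of v + x < 1).
--     s = sorted(a)
--     pos = [i for i in range(n) if s[i] > 0]
--     vals = [s[i] for i in pos]
--     total = sum(pos)
--     for x in s:
--         total -= bisect_left(vals, 1 - x)
--     return total
-- ===== Notes on version B (the rewrite author's own statement) =====
-- stated objective: alternative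
-- what changed: A sums, per positive element, (index minus a bisect_left over the whole array); B swaps the order of summation: it collects the positive indices and their values once, then makes one pass over the array subtracting, per element x, a bisect_left over the positive-value list counting values v with v < 1 - x.
import Mathlib
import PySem

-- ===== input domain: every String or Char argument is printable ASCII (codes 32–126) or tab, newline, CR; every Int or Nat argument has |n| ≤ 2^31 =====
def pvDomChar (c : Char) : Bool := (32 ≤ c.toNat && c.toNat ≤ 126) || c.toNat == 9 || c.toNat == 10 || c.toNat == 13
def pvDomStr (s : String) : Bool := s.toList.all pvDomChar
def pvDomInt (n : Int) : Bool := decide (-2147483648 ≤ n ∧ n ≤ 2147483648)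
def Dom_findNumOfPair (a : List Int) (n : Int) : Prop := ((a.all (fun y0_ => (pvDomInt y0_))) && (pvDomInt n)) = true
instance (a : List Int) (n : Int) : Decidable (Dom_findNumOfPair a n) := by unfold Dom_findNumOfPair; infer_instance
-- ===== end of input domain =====

-- B swaps the order of summation: instead of A's per-positive-element bisect over
-- the whole array, it records the positive indices/values once and subtracts, per
-- array element, a bisect over the positive-value list (objective: alternative).

-- ===== PORT A =====
-- for-loop of A as structural recursion on the remaining iteration count;
-- a[i] (i ≥ 0) is s[i]?, none = IndexError (excluded by Pre_)
def pvLoopA (s : List Int) (i : Nat) (fuel : Nat) (ans : Int) : Int :=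
  match fuel with
  | 0 => ans
  | f + 1 =>
    match s[i]? with
    | none => ans
    | some v =>
      if v ≤ 0 then pvLoopA s (i + 1) f ans
      else pvLoopA s (i + 1) f (ans + ((i : Int) - (PySem.List.bisectLeft s (-v + 1) : Int)))

def findNumOfPair (a : List Int) (n : Int) : Int :=
  let s := PySem.List.sorted a (fun x => x)
  pvLoopA s 0 n.toNat 0

-- ===== PORT B =====
-- transliteration of Source B; the list indexings s[i] hit indices i < n ≤ len(s)
-- under Pre_, so getD is exact there
def findNumOfPair_alt (a : List Int) (n : Int) : Int :=
  let s := PySem.List.sorted a (fun x => x)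
  let pos := (List.range n.toNat).filter (fun i => decide (0 < s.getD i 0))
  let vals := pos.map (fun i => s.getD i 0)
  let total := (pos.map (fun (i : Nat) => (i : Int))).sum
  s.foldl (fun acc x => acc - (PySem.List.bisectLeft vals (1 - x) : Int)) total

-- ===== PRECONDITION & SPEC =====
-- Python A raises IndexError on a[i] when n > len(a); exactly those inputs are excluded.
def Pre_findNumOfPair (a : List Int) (n : Int) : Prop := n ≤ (a.length : Int)
instance (a : List Int) (n : Int) : Decidable (Pre_findNumOfPair a n) := by unfold Pre_findNumOfPair; infer_instance
def pvWitness_findNumOfPair : List Int × Int := ([1, -1, 2, 0], 4)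

def Spec_findNumOfPair (a : List Int) (n : Int) (out : Int) : Prop := out = findNumOfPair_alt a n
instance (a : List Int) (n : Int) (out : Int) : Decidable (Spec_findNumOfPair a n out) := by unfold Spec_findNumOfPair; infer_instance

-- ===== CLAIM (what is proved, stated in full; the proofs are below) =====
def Claim_equal_findNumOfPair : Prop := ∀ (a : List Int) (n : Int), Dom_findNumOfPair a n → Pre_findNumOfPair a n → Spec_findNumOfPair a n (findNumOfPair a n)

-- ===== LEMMAS AND PROOFS =====

-- on a sorted list, bisect_left t is the number of elements < t
lemma pv_bl_eq_countP (s : List Int) (hs : s.Pairwise (· ≤ ·)) (t : Int) :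
    PySem.List.bisectLeft s t = s.countP (fun x => decide (x < t)) := by
  obtain ⟨hle, hlo, hhi⟩ := PySem.List.bisectLeft_spec s t hs
  set k := PySem.List.bisectLeft s t with hk
  have hsplit : s = s.take k ++ s.drop k := (List.take_append_drop k s).symm
  have h1 : (s.take k).countP (fun x => decide (x < t)) = (s.take k).length := by
    rw [List.countP_eq_length]
    intro x hx
    obtain ⟨j, hj, hget⟩ := List.mem_take_iff_getElem.mp hx
    have hjlen : j < s.length := lt_of_lt_of_le (lt_of_lt_of_le hj (min_le_right _ _)) le_rfl
    have hjk : j < k := lt_of_lt_of_le hj (min_le_left _ _)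
    have := hlo j hjlen hjk
    simp [← hget, this]
  have h2 : (s.drop k).countP (fun x => decide (x < t)) = 0 := by
    rw [List.countP_eq_zero]
    intro x hx
    obtain ⟨j, hj, hget⟩ := List.mem_drop_iff_getElem.mp hx
    have := hhi (k + j) (by omega) (by omega)
    simp [← hget]
    omega
  have hlen : (s.take k).length = k := by
    simp [List.length_take]; omega
  calc k = (s.take k).countP (fun x => decide (x < t)) + (s.drop k).countP (fun x => decide (x < t)) := by
            rw [h1, h2, hlen]; ring
    _ = s.countP (fun x => decide (x < t)) := by rw [← List.countP_append, ← hsplit]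

-- exchange the order of the double count: Σ_{v∈l} #{x∈m : x < 1-v} = Σ_{x∈m} #{v∈l : v < 1-x}
lemma pv_sum_swap (l m : List Int) :
    (l.map (fun v => ((m.countP (fun x => decide (x < 1 - v)) : Nat) : Int))).sum =
    (m.map (fun x => ((l.countP (fun v => decide (v < 1 - x)) : Nat) : Int))).sum := by
  induction l with
  | nil => simp
  | cons v l' ih =>
    simp only [List.map_cons, List.sum_cons, List.countP_cons]
    have hcast : ∀ x : Int,
        ((l'.countP (fun w => decide (w < 1 - x)) + if decide (v < 1 - x) then 1 else 0 : Nat) : Int)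
        = ((l'.countP (fun w => decide (w < 1 - x)) : Nat) : Int)
          + (if (fun x => decide (v < 1 - x)) x then (1 : Int) else 0) := by
      intro x; split_ifs <;> push_cast <;> ring
    rw [List.map_congr_left (fun x _ => hcast x), PySem.List.sum_map_add_int, ih,
        PySem.List.sum_map_ite_one_zero]
    have hsym : m.countP (fun x => decide (v < 1 - x)) = m.countP (fun x => decide (x < 1 - v)) := by
      apply List.countP_congr; intro x _; constructor <;> intro h <;> simp_all <;> omega
    rw [hsym]; ring

-- A's loop as a sum over range fuel (all touched indices in range)
lemma pv_loopA_sum (s : List Int) :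
    ∀ (fuel i : Nat) (ans : Int), i + fuel ≤ s.length →
      pvLoopA s i fuel ans = ans + ((List.range fuel).map (fun k =>
        if 0 < s.getD (i + k) 0 then ((i + k : Nat) : Int) - (PySem.List.bisectLeft s (1 - s.getD (i + k) 0) : Int)
        else 0)).sum := by
  intro fuel
  induction fuel with
  | zero => intro i ans _; simp [pvLoopA]
  | succ f ih =>
    intro i ans hle
    have hi : i < s.length := by omega
    have hget : s[i]? = some s[i] := List.getElem?_eq_getElem hi
    have hgetD : s.getD i 0 = s[i] := List.getD_eq_getElem s 0 hi
    rw [List.range_succ_eq_map]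
    simp only [pvLoopA, hget, List.map_cons, List.sum_cons, Nat.add_zero, List.map_map]
    have hmap : ∀ g : Nat → Int,
        ((List.range f).map (g ∘ Nat.succ)).sum = ((List.range f).map (fun k => g (k + 1))).sum := by
      intro g; apply congrArg List.sum; apply List.map_congr_left; intro k _; simp [Nat.succ_eq_add_one]
    have hshift : ((List.range f).map (fun k =>
        if 0 < s.getD (i + 1 + k) 0 then ((i + 1 + k : Nat) : Int) - (PySem.List.bisectLeft s (1 - s.getD (i + 1 + k) 0) : Int)
        else 0)) = ((List.range f).map (fun k =>
        if 0 < s.getD (i + (k + 1)) 0 then ((i + (k + 1) : Nat) : Int) - (PySem.List.bisectLeft s (1 - s.getD (i + (k + 1)) 0) : Int)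
        else 0)) := by
      apply List.map_congr_left; intro k _
      have hik : i + 1 + k = i + (k + 1) := by omega
      rw [hik]
    by_cases hv : s[i] ≤ 0
    · rw [if_pos hv, if_neg (by rw [hgetD]; omega)]
      rw [ih (i + 1) ans (by omega), hmap, hshift]
      ring
    · rw [if_neg hv, if_pos (by rw [hgetD]; omega)]
      rw [ih (i + 1) _ (by omega), hmap, hshift]
      have hb : (-s[i] + 1 : Int) = 1 - s.getD i 0 := by rw [hgetD]; ring
      rw [hb]
      ring

-- an if-then-else sum over a list is the sum over its filter
lemma pv_sum_ite_filter {α : Type} (l : List α) (p : α → Prop) [DecidablePred p] (f : α → Int) :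
    (l.map (fun k => if p k then f k else 0)).sum = ((l.filter (fun k => decide (p k))).map f).sum := by
  induction l with
  | nil => rfl
  | cons x l' ih =>
    by_cases hx : p x
    · simp [hx, ih]
    · simp [hx, ih]

-- sum of differences splits
lemma pv_sum_map_sub {α : Type} (l : List α) (f g : α → Int) :
    (l.map (fun k => f k - g k)).sum = (l.map f).sum - (l.map g).sum := by
  induction l with
  | nil => simp
  | cons x l' ih => simp [ih]; ring

-- a foldl that only subtracts is the initial value minus a sum
lemma pv_foldl_sub {α : Type} (l : List α) (g : α → Int) (a : Int) :
    l.foldl (fun acc x => acc - g x) a = a - (l.map g).sum := by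
  induction l generalizing a with
  | nil => simp
  | cons x l' ih => simp [ih]; ring

-- the recorded positive values are sorted (increasing indices into a sorted list)
lemma pv_vals_pairwise (a : List Int) (nn : Nat)
    (hn : nn ≤ (PySem.List.sorted a (fun x => x)).length) :
    (((List.range nn).filter (fun i => decide (0 < (PySem.List.sorted a (fun x => x)).getD i 0))).map
      (fun i => (PySem.List.sorted a (fun x => x)).getD i 0)).Pairwise (· ≤ ·) := by
  rw [List.pairwise_map]
  have hpl : ((List.range nn).filter (fun i => decide (0 < (PySem.List.sorted a (fun x => x)).getD i 0))).Pairwise (· < ·) :=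
    List.Pairwise.filter _ List.pairwise_lt_range
  refine hpl.imp_of_mem ?_
  intro i j hi hj hij
  have hiM : i ∈ List.range nn := List.mem_of_mem_filter hi
  have hjM : j ∈ List.range nn := List.mem_of_mem_filter hj
  have hib : i < (PySem.List.sorted a (fun x => x)).length := lt_of_lt_of_le (List.mem_range.mp hiM) hn
  have hjb : j < (PySem.List.sorted a (fun x => x)).length := lt_of_lt_of_le (List.mem_range.mp hjM) hn
  rw [List.getD_eq_getElem _ 0 hib, List.getD_eq_getElem _ 0 hjb]
  exact PySem.List.sorted_id_getElem_mono a (le_of_lt hij) hjb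

-- ===== VERDICT (by name: the statement is the Claim_ definition above) =====
theorem findNumOfPair_spec : Claim_equal_findNumOfPair := by
  intro a n _ hpre
  unfold Spec_findNumOfPair findNumOfPair findNumOfPair_alt
  set s := PySem.List.sorted a (fun x => x) with hsdef
  have hs : s.Pairwise (· ≤ ·) := PySem.List.sorted_pairwise a (fun x => x)
  have hlen : s.length = a.length := PySem.List.length_sorted a (fun x => x) false
  have hn : n.toNat ≤ s.length := by
    unfold Pre_findNumOfPair at hpre; omega
  set pos := (List.range n.toNat).filter (fun i => decide (0 < s.getD i 0)) with hposdef
  set vals := pos.map (fun i => s.getD i 0) with hvalsdef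
  have hvals : vals.Pairwise (· ≤ ·) := pv_vals_pairwise a n.toNat hn
  -- A's loop as a filtered sum
  rw [pv_loopA_sum s n.toNat 0 0 (by omega)]
  simp only [zero_add]
  rw [pv_sum_ite_filter (List.range n.toNat) (fun i => 0 < s.getD i 0)
        (fun k => ((k : Nat) : Int) - (PySem.List.bisectLeft s (1 - s.getD k 0) : Int)), ← hposdef]
  rw [pv_sum_map_sub pos (fun k => ((k : Nat) : Int)) (fun k => (PySem.List.bisectLeft s (1 - s.getD k 0) : Int))]
  -- replace both bisects by counts
  have hA : (pos.map (fun k => (PySem.List.bisectLeft s (1 - s.getD k 0) : Int))).sum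
      = (vals.map (fun v => ((s.countP (fun x => decide (x < 1 - v)) : Nat) : Int))).sum := by
    rw [hvalsdef, List.map_map]
    congr 1
    apply List.map_congr_left; intro k _
    simp [Function.comp, pv_bl_eq_countP s hs]
  rw [hA, pv_sum_swap vals s, pv_foldl_sub s (fun x => (PySem.List.bisectLeft vals (1 - x) : Int))]
  congr 1
  apply congrArg List.sum
  apply List.map_congr_left; intro x _
  rw [pv_bl_eq_countP vals hvals]
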